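-- pv_equiv track=rewrite | github.com/RishabhS21/col100_assignments | a1/col100_assignment_1.py | mul4
-- ===== SOURCE A (Python) =====
-- def add(a,b,c):
--     #full adder with help of half adder
--     s1=(a or b) and not (a and b)                                               #taken hint from half adder for sum bit
--     c1=(a and b)                                                                #half adder for carry bit
--     c2=(s1 and c)                                                               #carry bit for s1 and c
--     return ((s1 or c) and not (s1 and c), c2 or c1)
--
-- def add4(a0,a1,a2,a3, b0,b1,b2,b3, c):
--     #a 4-bit adder with the help of full adder
--     (x1,y1)=add(a0,b0,c)                                                        #continuously taking carry bit
--     (x2,y2)=add(a1,b1,y1)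
--     (x3,y3)=add(a2,b2,y2)
--     (x4,y4)=add(a3,b3,y3)
--     return (x1,x2,x3,x4,y4)
--
-- def cmp(a0,a1,a2,a3, b0,b1,b2,b3):
--     #last 2 digits are 03 of my entry number so remainder is 3 thus >= is our case of "True"
--     #program for a3a2a1a0>=b3b2b1b0
--     if (a3 is True and b3 is False):
--         return True
--     elif ((not a3 and not b3) or (a3 and b3)) and (a2 is True and b2 is False):
--         return True
--     elif ((not a3 and not b3) or (a3 and b3)) and ((not a2 and not b2) or (a2 and b2)) and (a1 is True and b1 is False):
--         return True
--     elif ((not a3 and not b3) or (a3 and b3)) and ((not a2 and not b2) or (a2 and b2)) and ((not a1 and not b1) or (a1 and b1)) and (a0 is True and b0 is False):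
--         return True
--     elif ((not a3 and not b3) or (a3 and b3)) and ((not a2 and not b2) or (a2 and b2)) and ((not a1 and not b1) or (a1 and b1)) and ((not a0 and not b0) or (a0 and b0)):
--         return True
--     else:
--         return False
--
-- def hsub(a,b):
--     #defining 1-bit subtractor
--     return ((a or b) and not (a and b), not a and b)
--
-- def fsub(a,b,c):
--     #full subtractor using 1-bit subtractor
--     (s0,s1)=hsub(a,b)
--     (s2,s3)=hsub(s0,c)
--     return (s2,s1 or s3)
--
-- def sub4(a0,a1,a2,a3, b0,b1,b2,b3):
--     #4-bit subtractor using full subtractor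
--     if cmp(a0,a1,a2,a3, b0,b1,b2,b3):
--         (s0,s1)=fsub(a0,b0,False)                                               #initially borrow is 0 i.e. False
--         (s2,s3)=fsub(a1,b1,s1)                                                  #continuously taking borrow
--         (s4,s5)=fsub(a2,b2,s3)
--         (s6,s7)=fsub(a3,b3,s5)
--         return (s0,s2,s4,s6,False)                                              #False represent positive sign
--     else:
--         (d0,d1,d2,d3,d4)=sub4(b0,b1,b2,b3, a0,a1,a2,a3)
--         return (d0,d1,d2,d3,True)                                               #True represent negative sign
--
-- def add8(a, b, c):
--     #8-bit adder using two 4-bit adders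
--     #assigning local variables
--     (a0,a1,a2,a3,a4,a5,a6,a7) = a
--     (b0,b1,b2,b3,b4,b5,b6,b7) = b
--     (s0,s1,s2,s3,s4)=add4(a0,a1,a2,a3, b0,b1,b2,b3, c)                          # s4 is a carry bit
--     (s5,s6,s7,s8,s9)=add4(a4,a5,a6,a7, b4,b5,b6,b7, s4)
--     return ((s0,s1,s2,s3,s5,s6,s7,s8), s9)
--
-- def mul4(a, b):
--     (a0,a1,a2,a3) = a                                                           #assigning local variables
--     (b0,b1,b2,b3) = b
--     #defining 4 bit multiplier
--     if b == (False,False,False,False):                                          #base case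
--         return (False,False,False,False,False,False,False,False)
--     else:
--         (s0,s1,s2,s3,s4)=sub4(b0,b1,b2,b3, True,False,False,False)              #recursive case
--         s = (s0,s1,s2,s3)
--         (m0,m1,m2,m3,m4,m5,m6,m7)=mul4(a, s)
--         x1=(m0,m1,m2,m3,m4,m5,m6,m7)
--         x2=(a0,a1,a2,a3,False,False,False,False)
--         ((p0,p1,p2,p3,p4,p5,p6,p7), p8)=add8(x1, x2, False)
--         return (p0,p1,p2,p3,p4,p5,p6,p7)
-- ===== SOURCE B (Python) =====
-- def add(a,b,c):
--     # gate-level full adder (same boolean semantics as the original)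
--     s1=(a or b) and not (a and b)
--     c1=(a and b)
--     c2=(s1 and c)
--     return ((s1 or c) and not (s1 and c), c2 or c1)
--
-- def add4(a0,a1,a2,a3, b0,b1,b2,b3, c):
--     (x1,y1)=add(a0,b0,c)
--     (x2,y2)=add(a1,b1,y1)
--     (x3,y3)=add(a2,b2,y2)
--     (x4,y4)=add(a3,b3,y3)
--     return (x1,x2,x3,x4,y4)
--
-- def add8(a, b, c):
--     (a0,a1,a2,a3,a4,a5,a6,a7) = a
--     (b0,b1,b2,b3,b4,b5,b6,b7) = b
--     (s0,s1,s2,s3,s4)=add4(a0,a1,a2,a3, b0,b1,b2,b3, c)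
--     (s5,s6,s7,s8,s9)=add4(a4,a5,a6,a7, b4,b5,b6,b7, s4)
--     return ((s0,s1,s2,s3,s5,s6,s7,s8), s9)
--
-- def mul4(a, b):
--     # shift-and-add multiplier: 4 conditional 8-bit additions, no recursion
--     (a0,a1,a2,a3) = a
--     (b0,b1,b2,b3) = b
--     acc = (False,False,False,False,False,False,False,False)
--     sh = (a0,a1,a2,a3,False,False,False,False)
--     for bit in (b0,b1,b2,b3):
--         if bit:
--             (acc, _carry) = add8(acc, sh, False)
--         sh = (False,) + sh[:7]
--     return acc
-- ===== Notes on version B (the rewrite author's own statement) =====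
-- stated objective: faster
-- what changed: Replaced the recursive repeated-addition multiplier (decrement b by a gate-level subtractor and add a once per unit of b, up to 15 times) with a shift-and-add multiplier: a single loop over b's 4 bits that conditionally adds the shifted a into an 8-bit accumulator using the same gate-level add8.
import Mathlib
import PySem

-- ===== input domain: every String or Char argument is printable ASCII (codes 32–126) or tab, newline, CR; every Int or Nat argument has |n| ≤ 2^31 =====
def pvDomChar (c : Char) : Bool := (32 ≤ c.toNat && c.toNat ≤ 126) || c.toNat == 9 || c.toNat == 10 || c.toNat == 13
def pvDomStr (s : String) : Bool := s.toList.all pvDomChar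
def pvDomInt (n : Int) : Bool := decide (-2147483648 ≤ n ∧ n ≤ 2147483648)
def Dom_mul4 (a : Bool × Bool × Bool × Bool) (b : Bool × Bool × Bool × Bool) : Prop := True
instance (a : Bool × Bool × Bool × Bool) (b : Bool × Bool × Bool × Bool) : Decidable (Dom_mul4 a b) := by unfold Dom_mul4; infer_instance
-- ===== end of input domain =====

-- B replaces A's recursive repeated-addition multiplier by a 4-step shift-and-add
-- multiplier over the same gate-level 8-bit adder (objective: faster — constant factor).
-- The two recursive Python functions (sub4, mul4) are ported with an explicit fuel
-- parameter that only makes the same recursion total: fuel 2 covers sub4's single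
-- argument-swapping recursive call, and fuel 16 covers mul4's count-down on the
-- value of b (at most 15).

-- ===== PORT A =====
def addG (a b c : Bool) : Bool × Bool :=
  let s1 := (a || b) && !(a && b)
  let c1 := a && b
  let c2 := s1 && c
  ((s1 || c) && !(s1 && c), c2 || c1)

def add4G (a0 a1 a2 a3 b0 b1 b2 b3 c : Bool) : Bool × Bool × Bool × Bool × Bool :=
  let t1 := addG a0 b0 c
  let t2 := addG a1 b1 t1.2
  let t3 := addG a2 b2 t2.2
  let t4 := addG a3 b3 t3.2
  (t1.1, t2.1, t3.1, t4.1, t4.2)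

def cmpG (a0 a1 a2 a3 b0 b1 b2 b3 : Bool) : Bool :=
  if a3 == true && b3 == false then true
  else if ((!a3 && !b3) || (a3 && b3)) && (a2 == true && b2 == false) then true
  else if ((!a3 && !b3) || (a3 && b3)) && ((!a2 && !b2) || (a2 && b2)) && (a1 == true && b1 == false) then true
  else if ((!a3 && !b3) || (a3 && b3)) && ((!a2 && !b2) || (a2 && b2)) && ((!a1 && !b1) || (a1 && b1)) && (a0 == true && b0 == false) then true
  else if ((!a3 && !b3) || (a3 && b3)) && ((!a2 && !b2) || (a2 && b2)) && ((!a1 && !b1) || (a1 && b1)) && ((!a0 && !b0) || (a0 && b0)) then true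
  else false

def hsubG (a b : Bool) : Bool × Bool :=
  ((a || b) && !(a && b), !a && b)

def fsubG (a b c : Bool) : Bool × Bool :=
  let s := hsubG a b
  let t := hsubG s.1 c
  (t.1, s.2 || t.2)

-- sub4 with fuel (2 suffices: the recursive call swaps the arguments and then
-- cmp holds, so it never recurses twice); fuel 0 returns an arbitrary value and
-- is never reached with the fuel sub4G supplies
def sub4Go (fuel : Nat) (a0 a1 a2 a3 b0 b1 b2 b3 : Bool) : Bool × Bool × Bool × Bool × Bool :=
  match fuel with
  | 0 => (false, false, false, false, false)
  | fuel + 1 =>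
    if cmpG a0 a1 a2 a3 b0 b1 b2 b3 then
      let t0 := fsubG a0 b0 false
      let t1 := fsubG a1 b1 t0.2
      let t2 := fsubG a2 b2 t1.2
      let t3 := fsubG a3 b3 t2.2
      (t0.1, t1.1, t2.1, t3.1, false)
    else
      let d := sub4Go fuel b0 b1 b2 b3 a0 a1 a2 a3
      (d.1, d.2.1, d.2.2.1, d.2.2.2.1, true)

def sub4G (a0 a1 a2 a3 b0 b1 b2 b3 : Bool) : Bool × Bool × Bool × Bool × Bool :=
  sub4Go 2 a0 a1 a2 a3 b0 b1 b2 b3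

def add8G (a b : Bool × Bool × Bool × Bool × Bool × Bool × Bool × Bool) (c : Bool) :
    (Bool × Bool × Bool × Bool × Bool × Bool × Bool × Bool) × Bool :=
  let s := add4G a.1 a.2.1 a.2.2.1 a.2.2.2.1 b.1 b.2.1 b.2.2.1 b.2.2.2.1 c
  let t := add4G a.2.2.2.2.1 a.2.2.2.2.2.1 a.2.2.2.2.2.2.1 a.2.2.2.2.2.2.2
             b.2.2.2.2.1 b.2.2.2.2.2.1 b.2.2.2.2.2.2.1 b.2.2.2.2.2.2.2 s.2.2.2.2
  ((s.1, s.2.1, s.2.2.1, s.2.2.2.1, t.1, t.2.1, t.2.2.1, t.2.2.2.1), t.2.2.2.2)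

-- mul4 with fuel (16 suffices: each recursive call is on b minus one, and a
-- 4-bit b is at most 15); fuel 0 is never reached with the fuel mul4 supplies
def mul4Go (fuel : Nat) (a : Bool × Bool × Bool × Bool) (b : Bool × Bool × Bool × Bool) :
    Bool × Bool × Bool × Bool × Bool × Bool × Bool × Bool :=
  match fuel with
  | 0 => (false, false, false, false, false, false, false, false)
  | fuel + 1 =>
    if b = (false, false, false, false) then
      (false, false, false, false, false, false, false, false)
    else
      let t := sub4G b.1 b.2.1 b.2.2.1 b.2.2.2 true false false false
      let s := (t.1, t.2.1, t.2.2.1, t.2.2.2.1)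
      let m := mul4Go fuel a s
      let x2 := (a.1, a.2.1, a.2.2.1, a.2.2.2, false, false, false, false)
      let p := add8G m x2 false
      p.1

def mul4 (a : Bool × Bool × Bool × Bool) (b : Bool × Bool × Bool × Bool) :
    Bool × Bool × Bool × Bool × Bool × Bool × Bool × Bool :=
  mul4Go 16 a b

-- ===== PORT B =====
def shl8 (t : Bool × Bool × Bool × Bool × Bool × Bool × Bool × Bool) :
    Bool × Bool × Bool × Bool × Bool × Bool × Bool × Bool :=
  (false, t.1, t.2.1, t.2.2.1, t.2.2.2.1, t.2.2.2.2.1, t.2.2.2.2.2.1, t.2.2.2.2.2.2.1)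

def mul4_alt (a : Bool × Bool × Bool × Bool) (b : Bool × Bool × Bool × Bool) :
    Bool × Bool × Bool × Bool × Bool × Bool × Bool × Bool :=
  let acc0 := (false, false, false, false, false, false, false, false)
  let sh0 := (a.1, a.2.1, a.2.2.1, a.2.2.2, false, false, false, false)
  let st := [b.1, b.2.1, b.2.2.1, b.2.2.2].foldl
    (fun st bit => ((if bit then (add8G st.1 st.2 false).1 else st.1), shl8 st.2))
    (acc0, sh0)
  st.1

-- ===== PRECONDITION & SPEC =====
def Spec_mul4 (a : Bool × Bool × Bool × Bool) (b : Bool × Bool × Bool × Bool) (out : Bool × Bool × Bool × Bool × Bool × Bool × Bool × Bool) : Prop := out = mul4_alt a b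
instance (a : Bool × Bool × Bool × Bool) (b : Bool × Bool × Bool × Bool) (out : Bool × Bool × Bool × Bool × Bool × Bool × Bool × Bool) : Decidable (Spec_mul4 a b out) := by
  unfold Spec_mul4
  letI d7 : DecidableEq (Bool × Bool × Bool × Bool × Bool × Bool × Bool) := instDecidableEqProd
  letI : DecidableEq (Bool × Bool × Bool × Bool × Bool × Bool × Bool × Bool) := instDecidableEqProd
  infer_instance

-- ===== CLAIM (what is proved, stated in full; the proofs are below) =====
def Claim_equal_mul4 : Prop := ∀ (a : Bool × Bool × Bool × Bool) (b : Bool × Bool × Bool × Bool), Dom_mul4 a b → Spec_mul4 a b (mul4 a b)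

-- ===== LEMMAS AND PROOFS =====
theorem mul4_spec : Claim_equal_mul4 := by
  unfold Claim_equal_mul4 Spec_mul4 mul4
  letI d7 : DecidableEq (Bool × Bool × Bool × Bool × Bool × Bool × Bool) := instDecidableEqProd
  letI : DecidableEq (Bool × Bool × Bool × Bool × Bool × Bool × Bool × Bool) := instDecidableEqProd
  intro a b _
  revert a b
  decide
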